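-- pv_equiv track=rewrite | github.com/charanan/Thesis_project | Shape_fitting_with_rotate/rotate.py | rotate_shape
-- ===== SOURCE A (Python) =====
-- def rotate_shape(shape, degree):
--     if degree == 90:
--         return [(y, -x) for (x, y) in shape]
--     elif degree == 180:
--         return [(-x, -y) for (x, y) in shape]
--     elif degree == 270:
--         return [(-y, x) for (x, y) in shape]
--     return shape
-- ===== SOURCE B (Python) =====
-- def rotate_shape(shape, degree):
--     turns = {90: 1, 180: 2, 270: 3}.get(degree)
--     if turns is None:
--         return shape
--     result = shape
--     for _ in range(turns):
--         result = [(y, -x) for (x, y) in result]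
--     return result
-- ===== Notes on version B (the rewrite author's own statement) =====
-- stated objective: alternative
-- what changed: B maps the degree to a quarter-turn count (90->1, 180->2, 270->3, else unchanged) and iterates the single 90-degree rotation (x,y)->(y,-x) that many times, instead of a separate closed-form formula per branch.
import Mathlib
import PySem

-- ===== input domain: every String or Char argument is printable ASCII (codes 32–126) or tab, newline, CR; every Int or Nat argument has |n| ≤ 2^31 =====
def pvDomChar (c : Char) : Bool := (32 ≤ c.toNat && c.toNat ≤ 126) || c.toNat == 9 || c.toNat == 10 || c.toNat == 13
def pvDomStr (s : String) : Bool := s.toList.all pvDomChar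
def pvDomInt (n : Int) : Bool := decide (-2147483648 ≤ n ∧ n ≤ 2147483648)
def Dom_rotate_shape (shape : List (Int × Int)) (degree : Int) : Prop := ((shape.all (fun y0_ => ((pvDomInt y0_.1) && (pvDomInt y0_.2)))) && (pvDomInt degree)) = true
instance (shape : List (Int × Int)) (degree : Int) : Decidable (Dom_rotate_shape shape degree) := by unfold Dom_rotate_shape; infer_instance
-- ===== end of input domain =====

-- B replaces the three per-branch rotation formulas by iterating the single quarter-turn (x,y)->(y,-x); objective: alternative decomposition.

-- ===== PORT A =====
def rotate_shape (shape : List (Int × Int)) (degree : Int) : List (Int × Int) :=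
  if degree == 90 then shape.map (fun p => (p.2, -p.1))
  else if degree == 180 then shape.map (fun p => (-p.1, -p.2))
  else if degree == 270 then shape.map (fun p => (-p.2, p.1))
  else shape

-- ===== PORT B =====
-- turns = {90: 1, 180: 2, 270: 3}.get(degree)
def rotate_shape_alt (shape : List (Int × Int)) (degree : Int) : List (Int × Int) :=
  match PySem.Dict.get? (PySem.Dict.ofList [((90 : Int), (1 : Nat)), (180, 2), (270, 3)]) degree with
  | none => shape
  | some turns =>
      -- for _ in range(turns): result = [(y, -x) for (x, y) in result]
      (List.range turns).foldl (fun result _ => result.map (fun p => (p.2, -p.1))) shape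

-- ===== PRECONDITION & SPEC =====
def Spec_rotate_shape (shape : List (Int × Int)) (degree : Int) (out : List (Int × Int)) : Prop := out = rotate_shape_alt shape degree
instance (shape : List (Int × Int)) (degree : Int) (out : List (Int × Int)) : Decidable (Spec_rotate_shape shape degree out) := by unfold Spec_rotate_shape; infer_instance

-- ===== CLAIM (what is proved, stated in full; the proofs are below) =====
def Claim_equal_rotate_shape : Prop := ∀ (shape : List (Int × Int)) (degree : Int), Dom_rotate_shape shape degree → Spec_rotate_shape shape degree (rotate_shape shape degree)

-- ===== LEMMAS AND PROOFS =====

theorem quarter_sq (shape : List (Int × Int)) :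
    (shape.map (fun p : Int × Int => (p.2, -p.1))).map (fun p : Int × Int => (p.2, -p.1))
      = shape.map (fun p : Int × Int => (-p.1, -p.2)) := by
  simp [List.map_map, Function.comp]

-- ===== VERDICT (by name: the statement is the Claim_ definition above) =====
theorem rotate_shape_spec : Claim_equal_rotate_shape := by
  intro shape degree _
  unfold Spec_rotate_shape rotate_shape rotate_shape_alt
  by_cases h90 : degree = 90
  · subst h90
    simp [PySem.Dict.get?, PySem.Dict.ofList, PySem.Dict.empty, PySem.Dict.update,
      PySem.Dict.insert, List.range, List.range.loop, List.foldl]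
  · by_cases h180 : degree = 180
    · subst h180
      simp [PySem.Dict.get?, PySem.Dict.ofList, PySem.Dict.empty, PySem.Dict.update,
        PySem.Dict.insert, List.range, List.range.loop, List.foldl,
        quarter_sq shape]
    · by_cases h270 : degree = 270
      · subst h270
        simp [PySem.Dict.get?, PySem.Dict.ofList, PySem.Dict.empty, PySem.Dict.update,
          PySem.Dict.insert, List.range, List.range.loop, List.foldl]
      · have e90 : ((90 : Int) == degree) = false := by simp [Ne.symm h90]
        have e180 : ((180 : Int) == degree) = false := by simp [Ne.symm h180]
        have e270 : ((270 : Int) == degree) = false := by simp [Ne.symm h270]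
        simp [PySem.Dict.get?, PySem.Dict.ofList, PySem.Dict.empty, PySem.Dict.update,
          PySem.Dict.insert, e90, e180, e270, h90, h180, h270]
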